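-- pv_equiv track=rewrite | github.com/p-eduardo-medina/Python_Expert_Projects | Count_Aniumals.py | count_animals
-- ===== SOURCE A (Python) =====
-- def count_animals(txt):
--     animals = ["dog", "cat", "bat", "cock", "cow", "pig",
--                 "fox", "ant", "bird", "lion", "wolf", "deer", "bear",
--                 "frog", "hen", "mole", "duck", "goat"]
--     count = 0
--     dictTxt = {}
--     for char in txt: dictTxt[char] = dictTxt.get(char, 0) + 1
--     for animal in animals:
--         dictAnimal = {}
--         for char in animal: dictAnimal[char] = dictAnimal.get(char, 0) + 1
--         while all(char in dictTxt and dictTxt[char] >= dictAnimal[char] for char in dictAnimal):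
--             count += 1
--             for char in dictAnimal: dictTxt[char] -= dictAnimal[char]
--     return count
-- ===== SOURCE B (Python) =====
-- def count_animals(txt):
--     animals = ["dog", "cat", "bat", "cock", "cow", "pig",
--                 "fox", "ant", "bird", "lion", "wolf", "deer", "bear",
--                 "frog", "hen", "mole", "duck", "goat"]
--     counts = {}
--     for ch in txt:
--         counts[ch] = counts.get(ch, 0) + 1
--     total = 0
--     for animal in animals:
--         need = {}
--         for ch in animal:
--             need[ch] = need.get(ch, 0) + 1
--         k = min(counts.get(ch, 0) // n for ch, n in need.items())
--         if k > 0: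
--             total += k
--             for ch, n in need.items():
--                 counts[ch] -= k * n
--     return total
-- ===== Notes on version B (the rewrite author's own statement) =====
-- stated objective: alternative
-- what changed: Instead of repeatedly re-checking availability and subtracting one animal's letters per while-iteration, B computes the number of copies of each animal in one step as the minimum floor-division of available letter counts by needed counts, then subtracts all consumed letters with a single multiply-subtract pass.
import Mathlib
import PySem

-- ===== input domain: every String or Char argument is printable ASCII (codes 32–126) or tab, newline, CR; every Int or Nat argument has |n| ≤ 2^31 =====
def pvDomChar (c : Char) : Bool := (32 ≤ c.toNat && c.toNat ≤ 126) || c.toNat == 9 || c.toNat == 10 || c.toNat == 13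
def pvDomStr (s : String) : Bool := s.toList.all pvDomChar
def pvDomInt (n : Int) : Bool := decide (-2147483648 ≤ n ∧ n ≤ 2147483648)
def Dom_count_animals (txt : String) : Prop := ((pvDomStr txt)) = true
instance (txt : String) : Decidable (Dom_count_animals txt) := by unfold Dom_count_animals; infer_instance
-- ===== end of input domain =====

-- B replaces A's per-copy while-loop (one availability check + one subtraction pass per copy counted)
-- by a single min-of-floor-divisions per animal followed by one multiply-subtract pass (alternative
-- algorithm, same result).

-- the literal animal list, shared verbatim by both Python sources
def pvAnimals : List String := ["dog", "cat", "bat", "cock", "cow", "pig",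
  "fox", "ant", "bird", "lion", "wolf", "deer", "bear",
  "frog", "hen", "mole", "duck", "goat"]

-- 'd = {}; for ch in s: d[ch] = d.get(ch, 0) + 1' — the letter-counting loop both sources contain verbatim
def pvCountDict (w : List Char) : PySem.Dict Char Int :=
  w.foldl (fun d c => d.insert c (d.getD c 0 + 1)) PySem.Dict.empty

-- ===== PORT A =====
-- 'all(char in dictTxt and dictTxt[char] >= dictAnimal[char] for char in dictAnimal)'
def pvCondA (da dt : PySem.Dict Char Int) : Bool :=
  da.keys.all (fun c => dt.contains c && decide (da.getD c 0 ≤ dt.getD c 0))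

-- 'for char in dictAnimal: dictTxt[char] -= dictAnimal[char]' — every such char is present
-- in dictTxt when this runs (the while-condition just held), so modify's default 0 is never used
def pvSubA (da dt : PySem.Dict Char Int) : PySem.Dict Char Int :=
  da.keys.foldl (fun d c => d.modify c 0 (fun v => v - da.getD c 0)) dt

-- the while-loop; fuel only makes it total (proved never exhausted on reachable states)
def pvLoopA (da : PySem.Dict Char Int) : Nat → PySem.Dict Char Int → Int → Int × PySem.Dict Char Int
  | 0, dt, count => (count, dt)
  | fuel + 1, dt, count =>
      if pvCondA da dt then pvLoopA da fuel (pvSubA da dt) (count + 1) else (count, dt)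

def count_animals (txt : String) : Int :=
  (pvAnimals.foldl
    (fun st animal => pvLoopA (pvCountDict animal.toList) (txt.toList.length + 1) st.2 st.1)
    ((0 : Int), pvCountDict txt.toList)).1

-- ===== PORT B =====
-- 'min(counts.get(ch, 0) // n for ch, n in need.items())' — need is nonempty for every animal,
-- so min?'s default is never used
def pvK (need dt : PySem.Dict Char Int) : Int :=
  ((PySem.List.min? (need.items.map (fun p => PySem.Int.floordiv (dt.getD p.1 0) p.2))
      (fun y => y)).getD 0)

-- one animal of B's loop: k copies at once, then one multiply-subtract pass
def pvStepB (w : List Char) (st : Int × PySem.Dict Char Int) : Int × PySem.Dict Char Int :=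
  let need := pvCountDict w
  let k := pvK need st.2
  if 0 < k then
    (st.1 + k, need.items.foldl (fun d p => d.modify p.1 0 (fun v => v - k * p.2)) st.2)
  else st

def count_animals_alt (txt : String) : Int :=
  (pvAnimals.foldl (fun st animal => pvStepB animal.toList st)
    ((0 : Int), pvCountDict txt.toList)).1

-- ===== PRECONDITION & SPEC =====
def Spec_count_animals (txt : String) (out : Int) : Prop := out = count_animals_alt txt
instance (txt : String) (out : Int) : Decidable (Spec_count_animals txt out) := by unfold Spec_count_animals; infer_instance

-- ===== CLAIM (what is proved, stated in full; the proofs are below) =====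
def Claim_equal_count_animals : Prop := ∀ (txt : String), Dom_count_animals txt → Spec_count_animals txt (count_animals txt)

-- ===== LEMMAS AND PROOFS =====

-- the counting loop is collections.Counter
lemma pv_countDict_eq (w : List Char) : pvCountDict w = PySem.Dict.counter w :=
  PySem.Dict.foldl_insert_getD_add_one_eq_counter w

lemma pv_keys_ne (w : List Char) (hw : w ≠ []) : (PySem.Dict.counter w).keys ≠ [] := by
  obtain ⟨c, hc⟩ := List.exists_mem_of_ne_nil w hw
  rw [PySem.Dict.keys_counter]
  exact List.ne_nil_of_mem ((PySem.Set.mem_ofList w c).2 hc)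

lemma pv_da_pos (w : List Char) : ∀ c ∈ (PySem.Dict.counter w).keys, 1 ≤ (PySem.Dict.counter w).getD c 0 := by
  intro c hc
  rw [PySem.Dict.keys_counter] at hc
  rw [PySem.Dict.getD_counter]
  have : 0 < w.count c := List.count_pos_iff.2 ((PySem.Set.mem_ofList w c).1 hc)
  omega

-- getD after the subtract-fold over distinct keys
lemma pv_getD_subfold (L : List Char) (hnd : L.Nodup) (f : Char → Int) :
    ∀ (dt : PySem.Dict Char Int) (c : Char),
      (L.foldl (fun d c => d.modify c 0 (fun v => v - f c)) dt).getD c 0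
        = dt.getD c 0 - (if c ∈ L then f c else 0) := by
  induction L with
  | nil => simp
  | cons c0 L' ih =>
    rw [List.nodup_cons] at hnd
    intro dt c
    rw [List.foldl_cons, ih hnd.2 (dt.modify c0 0 (fun v => v - f c0)) c,
        PySem.Dict.getD_modify]
    by_cases h : c = c0
    · subst h
      simp [hnd.1]
    · simp [h, List.mem_cons]

-- items after the subtract-fold over distinct, all-present keys: a pointwise map
lemma pv_items_subfold (L : List Char) (hnd : L.Nodup) (f : Char → Int) :
    ∀ (dt : PySem.Dict Char Int), dt.keys.Nodup → (∀ c ∈ L, dt.contains c = true) →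
      (L.foldl (fun d c => d.modify c 0 (fun v => v - f c)) dt).items
        = dt.items.map (fun p => if p.1 ∈ L then (p.1, p.2 - f p.1) else p) := by
  induction L with
  | nil => simp
  | cons c0 L' ih =>
    rw [List.nodup_cons] at hnd
    intro dt hkn hcont
    have hc0 : dt.contains c0 = true := hcont c0 (List.mem_cons_self ..)
    have hmod_items : (dt.modify c0 0 (fun v => v - f c0)).items
        = dt.items.map (fun p => if p.1 = c0 then (c0, p.2 - f c0) else p) := by
      rw [PySem.Dict.modify, PySem.Dict.items_insert_of_contains _ _ hc0]
      refine List.map_congr_left (fun p hp => ?_)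
      by_cases h : p.1 = c0
      · have : dt.getD c0 0 = p.2 := by
          have := PySem.Dict.getD_of_mem_items dt (k := p.1) (v := p.2) hp hkn 0
          rw [h] at this; rw [this]
        simp [h, this]
      · simp [h]
    have hkn' : (dt.modify c0 0 (fun v => v - f c0)).keys.Nodup := by
      rw [PySem.Dict.keys_modify, PySem.Dict.keys_insert_of_contains (h := hc0)]
      exact hkn
    have hcont' : ∀ c ∈ L', (dt.modify c0 0 (fun v => v - f c0)).contains c = true := by
      intro c hc
      rw [PySem.Dict.contains_modify]
      simp [hcont c (List.mem_cons_of_mem _ hc)]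
    rw [List.foldl_cons, ih hnd.2 _ hkn' hcont', hmod_items, List.map_map]
    refine List.map_congr_left (fun p hp => ?_)
    by_cases h : p.1 = c0
    · simp [h, hnd.1, List.mem_cons]
    · by_cases h2 : p.1 ∈ L' <;> simp [h, h2, List.mem_cons]

-- running min commutes with subtracting 1 everywhere
lemma pv_minShift (t : List Int) : ∀ (x : Int),
    (t.map (fun v => v - 1)).foldl min (x - 1) = t.foldl min x - 1 := by
  induction t with
  | nil => intro x; simp
  | cons y t ih =>
    intro x
    rw [List.map_cons, List.foldl_cons, List.foldl_cons, ← ih]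
    congr 1
    omega

-- the per-letter quotient B's min ranges over
def pvFD (dt da : PySem.Dict Char Int) (c : Char) : Int :=
  PySem.Int.floordiv (dt.getD c 0) (da.getD c 0)

lemma pvK_eq (w : List Char) (dt : PySem.Dict Char Int) :
    pvK (PySem.Dict.counter w) dt
      = ((PySem.List.min? ((PySem.Dict.counter w).keys.map (pvFD dt (PySem.Dict.counter w)))
          (fun y => y)).getD 0) := by
  unfold pvK
  rw [PySem.Dict.items_eq_map_keys _ (PySem.Dict.nodup_keys_counter w) 0, List.map_map]
  rfl

lemma pv_k_mem (w : List Char) (hw : w ≠ []) (dt : PySem.Dict Char Int) :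
    ∃ c ∈ (PySem.Dict.counter w).keys,
      pvK (PySem.Dict.counter w) dt = pvFD dt (PySem.Dict.counter w) c := by
  rw [pvK_eq]
  cases hE : (PySem.Dict.counter w).keys with
  | nil => exact absurd hE (pv_keys_ne w hw)
  | cons c0 ks =>
    rw [List.map_cons, PySem.List.min?_id_cons, Option.getD_some]
    rcases PySem.List.foldl_min_mem (ks.map (pvFD dt (PySem.Dict.counter w)))
        (pvFD dt (PySem.Dict.counter w) c0) with h | h
    · exact ⟨c0, List.mem_cons_self .., h⟩
    · obtain ⟨c, hc, hce⟩ := List.mem_map.1 h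
      exact ⟨c, List.mem_cons_of_mem _ hc, hce.symm⟩

lemma pv_k_le (w : List Char) (hw : w ≠ []) (dt : PySem.Dict Char Int) :
    ∀ c ∈ (PySem.Dict.counter w).keys,
      pvK (PySem.Dict.counter w) dt ≤ pvFD dt (PySem.Dict.counter w) c := by
  rw [pvK_eq]
  cases hE : (PySem.Dict.counter w).keys with
  | nil => exact absurd hE (pv_keys_ne w hw)
  | cons c0 ks =>
    rw [List.map_cons, PySem.List.min?_id_cons, Option.getD_some]
    intro c hc
    have hmm := PySem.List.foldl_min_le (ks.map (pvFD dt (PySem.Dict.counter w)))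
        (pvFD dt (PySem.Dict.counter w) c0)
    rcases List.mem_cons.1 hc with h | h
    · rw [h]; exact hmm.1
    · exact hmm.2 _ (List.mem_map_of_mem h)

lemma pv_cond_elims (w : List Char) (dt : PySem.Dict Char Int)
    (h : pvCondA (PySem.Dict.counter w) dt = true) :
    ∀ c ∈ (PySem.Dict.counter w).keys,
      (PySem.Dict.counter w).getD c 0 ≤ dt.getD c 0 ∧ dt.contains c = true := by
  intro c hc
  have := (List.all_eq_true.1 h) c hc
  simp only [Bool.and_eq_true, decide_eq_true_eq] at this
  exact ⟨this.2, this.1⟩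

lemma pv_cond_true (w : List Char) (hw : w ≠ []) (dt : PySem.Dict Char Int)
    (h : pvCondA (PySem.Dict.counter w) dt = true) :
    1 ≤ pvK (PySem.Dict.counter w) dt := by
  obtain ⟨c, hc, hk⟩ := pv_k_mem w hw dt
  rw [hk]
  unfold pvFD
  rw [PySem.Int.le_floordiv_iff_mul_le (by have := pv_da_pos w c hc; omega), one_mul]
  exact (pv_cond_elims w dt h c hc).1

lemma pv_cond_false (w : List Char) (hw : w ≠ []) (dt : PySem.Dict Char Int)
    (h : pvCondA (PySem.Dict.counter w) dt = false) :
    pvK (PySem.Dict.counter w) dt ≤ 0 := by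
  obtain ⟨c, hc, hcc⟩ : ∃ c ∈ (PySem.Dict.counter w).keys,
      ¬ (dt.contains c && decide ((PySem.Dict.counter w).getD c 0 ≤ dt.getD c 0)) = true := by
    by_contra hall
    push_neg at hall
    rw [pvCondA, List.all_eq_true.2 (fun c hc => (hall c hc))] at h
    exact Bool.true_eq_false.mp h
  have hda := pv_da_pos w c hc
  have hlt : dt.getD c 0 < (PySem.Dict.counter w).getD c 0 := by
    simp only [Bool.and_eq_true, decide_eq_true_eq, not_and, not_le] at hcc
    by_cases hco : dt.contains c = true
    · exact hcc hco
    · rw [PySem.Dict.getD_of_not_contains dt 0 (by revert hco; cases dt.contains c <;> simp)]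
      omega
  have hle := pv_k_le w hw dt c hc
  have : pvFD dt (PySem.Dict.counter w) c ≤ 0 := by
    by_contra hpos
    push_neg at hpos
    have := (PySem.Int.le_floordiv_iff_mul_le (b := (PySem.Dict.counter w).getD c 0)
        (a := dt.getD c 0) (q := 1) (by omega)).1 (by unfold pvFD at hpos; omega)
    omega
  omega

-- (x - d) // d = x // d - 1 for d > 0
lemma pv_floordiv_sub_self (a b : Int) (hb : 0 < b) :
    PySem.Int.floordiv (a - b) b = PySem.Int.floordiv a b - 1 := by
  rw [PySem.Int.floordiv_eq_ediv_of_pos hb, PySem.Int.floordiv_eq_ediv_of_pos hb]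
  have h := Int.add_mul_ediv_right a (-1) (ne_of_gt hb)
  have h2 : a - b = a + -1 * b := by ring
  rw [h2, h]; ring

-- subtracting one copy of the animal lowers B's min by exactly one
lemma pv_k_shift (w : List Char) (hw : w ≠ []) (dt dt' : PySem.Dict Char Int)
    (hpt : ∀ c ∈ (PySem.Dict.counter w).keys,
      dt'.getD c 0 = dt.getD c 0 - (PySem.Dict.counter w).getD c 0) :
    pvK (PySem.Dict.counter w) dt' = pvK (PySem.Dict.counter w) dt - 1 := by
  rw [pvK_eq, pvK_eq]
  have hmap : (PySem.Dict.counter w).keys.map (pvFD dt' (PySem.Dict.counter w))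
      = ((PySem.Dict.counter w).keys.map (pvFD dt (PySem.Dict.counter w))).map (fun v => v - 1) := by
    rw [List.map_map]
    refine List.map_congr_left (fun c hc => ?_)
    have hda := pv_da_pos w c hc
    show pvFD dt' (PySem.Dict.counter w) c = pvFD dt (PySem.Dict.counter w) c - 1
    unfold pvFD
    rw [hpt c hc, pv_floordiv_sub_self _ _ (by omega)]
  rw [hmap]
  cases hE : (PySem.Dict.counter w).keys with
  | nil => exact absurd hE (pv_keys_ne w hw)
  | cons c0 ks =>
    rw [List.map_cons, List.map_cons, PySem.List.min?_id_cons,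
        PySem.List.min?_id_cons, Option.getD_some, Option.getD_some]
    exact pv_minShift _ _

-- main per-animal lemma: the fueled while-loop equals B's one-shot step
lemma pv_loopA_eq (w : List Char) (hw : w ≠ []) :
    ∀ (fuel : Nat) (dt : PySem.Dict Char Int) (count : Int),
      dt.keys.Nodup → (∀ c, 0 ≤ dt.getD c 0) →
      (pvK (PySem.Dict.counter w) dt).toNat < fuel →
      pvLoopA (PySem.Dict.counter w) fuel dt count = pvStepB w (count, dt) := by
  intro fuel
  induction fuel with
  | zero => intro dt count _ _ hf; omega
  | succ n ih =>
    intro dt count hkn h0 hf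
    cases hcond : pvCondA (PySem.Dict.counter w) dt
    · have hk0 := pv_cond_false w hw dt hcond
      simp only [pvLoopA, hcond, Bool.false_eq_true, if_false, pvStepB, pv_countDict_eq]
      rw [if_neg (by omega)]
    · have hnd := PySem.Dict.nodup_keys_counter w
      have hall := pv_cond_elims w dt hcond
      have hk1 := pv_cond_true w hw dt hcond
      have hcontL : ∀ c ∈ (PySem.Dict.counter w).keys, dt.contains c = true :=
        fun c hc => (hall c hc).2
      have hsub : pvSubA (PySem.Dict.counter w) dt
          = (PySem.Dict.counter w).keys.foldl
              (fun d c => d.modify c 0 (fun v => v - (PySem.Dict.counter w).getD c 0)) dt := rfl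
      have hgd' : ∀ c, (pvSubA (PySem.Dict.counter w) dt).getD c 0
          = dt.getD c 0 - (if c ∈ (PySem.Dict.counter w).keys then (PySem.Dict.counter w).getD c 0 else 0) := by
        intro c
        rw [hsub]
        exact pv_getD_subfold (PySem.Dict.counter w).keys hnd _ dt c
      have hkn' : (pvSubA (PySem.Dict.counter w) dt).keys.Nodup := by
        rw [hsub]
        exact PySem.Dict.nodup_keys_foldl_modify_key (PySem.Dict.counter w).keys (fun x => x) 0
          (fun _ x v => v - (PySem.Dict.counter w).getD x 0) dt hkn
      have h0' : ∀ c, 0 ≤ (pvSubA (PySem.Dict.counter w) dt).getD c 0 := by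
        intro c
        rw [hgd' c]
        by_cases hc : c ∈ (PySem.Dict.counter w).keys
        · have := (hall c hc).1
          rw [if_pos hc]
          omega
        · rw [if_neg hc]
          have := h0 c
          omega
      have hpt : ∀ c ∈ (PySem.Dict.counter w).keys,
          (pvSubA (PySem.Dict.counter w) dt).getD c 0 = dt.getD c 0 - (PySem.Dict.counter w).getD c 0 := by
        intro c hc
        rw [hgd' c, if_pos hc]
      have hks : pvK (PySem.Dict.counter w) (pvSubA (PySem.Dict.counter w) dt)
          = pvK (PySem.Dict.counter w) dt - 1 := pv_k_shift w hw dt _ hpt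
      have hf' : (pvK (PySem.Dict.counter w) (pvSubA (PySem.Dict.counter w) dt)).toNat < n := by
        rw [hks]; omega
      have hstep : pvLoopA (PySem.Dict.counter w) (n+1) dt count
          = pvLoopA (PySem.Dict.counter w) n (pvSubA (PySem.Dict.counter w) dt) (count + 1) := by
        simp only [pvLoopA, hcond, if_true]
      rw [hstep, ih _ _ hkn' h0' hf']
      have hcont' : ∀ c ∈ (PySem.Dict.counter w).keys,
          (pvSubA (PySem.Dict.counter w) dt).contains c = true := by
        intro c hc
        rw [PySem.Dict.contains_iff_mem_keys, hsub, PySem.Dict.keys_foldl_modify,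
            PySem.Set.update_eq_append_filter]
        exact List.mem_append_left _ ((PySem.Dict.contains_iff_mem_keys dt c).1 (hcontL c hc))
      have hitems' : (pvSubA (PySem.Dict.counter w) dt).items
          = dt.items.map (fun p => if p.1 ∈ (PySem.Dict.counter w).keys
              then (p.1, p.2 - (PySem.Dict.counter w).getD p.1 0) else p) := by
        rw [hsub]
        exact pv_items_subfold (PySem.Dict.counter w).keys hnd _ dt hkn hcontL
      have hsubmul : ∀ (k : Int) (d : PySem.Dict Char Int), d.keys.Nodup →
          (∀ c ∈ (PySem.Dict.counter w).keys, d.contains c = true) →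
          ((PySem.Dict.counter w).items.foldl (fun d p => d.modify p.1 0 (fun v => v - k * p.2)) d).items
            = d.items.map (fun p => if p.1 ∈ (PySem.Dict.counter w).keys
                then (p.1, p.2 - k * (PySem.Dict.counter w).getD p.1 0) else p) := by
        intro k d hdn hdc
        rw [PySem.Dict.items_eq_map_keys (PySem.Dict.counter w) hnd 0, List.foldl_map]
        exact pv_items_subfold (PySem.Dict.counter w).keys hnd
          (fun c => k * (PySem.Dict.counter w).getD c 0) d hdn hdc
      simp only [pvStepB, pv_countDict_eq, hks]
      by_cases hk2 : (0:Int) < pvK (PySem.Dict.counter w) dt - 1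
      · rw [if_pos hk2, if_pos (by omega)]
        simp only [Prod.mk.injEq]
        refine ⟨by omega, ?_⟩
        apply PySem.Dict.ext
        rw [hsubmul _ _ hkn' hcont', hsubmul _ dt hkn hcontL, hitems', List.map_map]
        refine List.map_congr_left (fun p hp => ?_)
        by_cases hpm : p.1 ∈ (PySem.Dict.counter w).keys
        · simp only [Function.comp, hpm, if_pos]
          simp only [Prod.mk.injEq, true_and]
          ring
        · have hpw : p.1 ∉ w := by
            rw [PySem.Dict.keys_counter, PySem.Set.mem_ofList] at hpm
            exact hpm
          simp [hpw]
      · have hkm1 : pvK (PySem.Dict.counter w) dt = 1 := by omega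
        rw [if_neg hk2, if_pos (by omega)]
        simp only [Prod.mk.injEq]
        refine ⟨by omega, ?_⟩
        apply PySem.Dict.ext
        rw [hsubmul _ dt hkn hcontL, hitems']
        refine List.map_congr_left (fun p hp => ?_)
        by_cases hpm : p.1 ∈ (PySem.Dict.counter w).keys
        · simp only [hpm, if_true, Prod.mk.injEq, true_and]
          rw [hkm1]
          ring
        · have hpw : p.1 ∉ w := by
            rw [PySem.Dict.keys_counter, PySem.Set.mem_ofList] at hpm
            exact hpm
          simp [hpw]

-- B's step keeps counts nonnegative and bounded, and keys distinct
lemma pv_stepB_inv (w : List Char) (hw : w ≠ []) (N : Nat) (st : Int × PySem.Dict Char Int)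
    (hkn : st.2.keys.Nodup) (hbd : ∀ c, 0 ≤ st.2.getD c 0 ∧ st.2.getD c 0 ≤ (N : Int)) :
    (pvStepB w st).2.keys.Nodup ∧
      (∀ c, 0 ≤ (pvStepB w st).2.getD c 0 ∧ (pvStepB w st).2.getD c 0 ≤ (N : Int)) := by
  simp only [pvStepB, pv_countDict_eq]
  by_cases hk : 0 < pvK (PySem.Dict.counter w) st.2
  · rw [if_pos hk]
    have hnd := PySem.Dict.nodup_keys_counter w
    constructor
    · exact PySem.Dict.nodup_keys_foldl_modify_key (PySem.Dict.counter w).items (fun p => p.1) 0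
        (fun _ p v => v - pvK (PySem.Dict.counter w) st.2 * p.2) st.2 hkn
    · intro c
      have hgd : ((PySem.Dict.counter w).items.foldl
            (fun d p => d.modify p.1 0 (fun v => v - pvK (PySem.Dict.counter w) st.2 * p.2)) st.2).getD c 0
          = st.2.getD c 0 - (if c ∈ (PySem.Dict.counter w).keys
              then pvK (PySem.Dict.counter w) st.2 * (PySem.Dict.counter w).getD c 0 else 0) := by
        rw [PySem.Dict.items_eq_map_keys (PySem.Dict.counter w) hnd 0, List.foldl_map]
        exact pv_getD_subfold (PySem.Dict.counter w).keys hnd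
          (fun c => pvK (PySem.Dict.counter w) st.2 * (PySem.Dict.counter w).getD c 0) st.2 c
      rw [hgd]
      by_cases hc : c ∈ (PySem.Dict.counter w).keys
      · rw [if_pos hc]
        have hda := pv_da_pos w c hc
        have hle := pv_k_le w hw st.2 c hc
        have hmul : pvK (PySem.Dict.counter w) st.2 * (PySem.Dict.counter w).getD c 0 ≤ st.2.getD c 0 := by
          refine (PySem.Int.le_floordiv_iff_mul_le (by omega)).1 ?_
          exact hle
        have hnn : 0 ≤ pvK (PySem.Dict.counter w) st.2 * (PySem.Dict.counter w).getD c 0 :=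
          Int.mul_nonneg (by omega) (by omega)
        have := hbd c
        omega
      · rw [if_neg hc]
        have := hbd c
        omega
  · rw [if_neg hk]
    exact ⟨hkn, hbd⟩

-- the per-animal folds agree
lemma pv_fold_eq (N : Nat) : ∀ (ws : List String) (st : Int × PySem.Dict Char Int),
    st.2.keys.Nodup → (∀ c, 0 ≤ st.2.getD c 0 ∧ st.2.getD c 0 ≤ (N : Int)) →
    (∀ a ∈ ws, a.toList ≠ []) →
    ws.foldl (fun st animal => pvLoopA (pvCountDict animal.toList) (N + 1) st.2 st.1) st
      = ws.foldl (fun st animal => pvStepB animal.toList st) st := by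
  intro ws
  induction ws with
  | nil => intro st _ _ _; rfl
  | cons a ws ih =>
    intro st hkn hbd hne
    have hw : a.toList ≠ [] := hne a (List.mem_cons_self ..)
    rw [List.foldl_cons, List.foldl_cons]
    have hfb : (pvK (PySem.Dict.counter a.toList) st.2).toNat < N + 1 := by
      obtain ⟨c, hc, hkm⟩ := pv_k_mem a.toList hw st.2
      have hda := pv_da_pos a.toList c hc
      have hle : pvK (PySem.Dict.counter a.toList) st.2 ≤ st.2.getD c 0 := by
        rw [hkm]
        unfold pvFD
        rw [PySem.Int.floordiv_eq_ediv_of_pos (by omega)]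
        exact Int.ediv_le_self _ (hbd c).1
      have := (hbd c).2
      omega
    have hstep : pvLoopA (pvCountDict a.toList) (N+1) st.2 st.1 = pvStepB a.toList st := by
      rw [pv_countDict_eq]
      exact pv_loopA_eq a.toList hw (N+1) st.2 st.1 hkn (fun c => (hbd c).1) hfb
    rw [hstep]
    have hinv := pv_stepB_inv a.toList hw N st hkn hbd
    exact ih _ hinv.1 hinv.2 (fun b hb => hne b (List.mem_cons_of_mem _ hb))

-- ===== VERDICT (by name: the statement is the Claim_ definition above) =====
theorem count_animals_spec : Claim_equal_count_animals := by
  intro txt _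
  show count_animals txt = count_animals_alt txt
  unfold count_animals count_animals_alt
  rw [pv_fold_eq txt.toList.length pvAnimals ((0 : Int), pvCountDict txt.toList)
        (by rw [pv_countDict_eq]; exact PySem.Dict.nodup_keys_counter _)
        (by
          intro c
          rw [pv_countDict_eq, PySem.Dict.getD_counter]
          refine ⟨Int.natCast_nonneg _, ?_⟩
          exact_mod_cast List.count_le_length ..)
        (by decide)]
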